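-- pv_equiv track=rewrite | github.com/shruthi-22/dm | spade.py | stage_k
-- ===== SOURCE A (Python) =====
-- min_support=2
--
-- def stage_k(l_last):
--     keys=list(l_last.keys())
--     n=len(keys)
--
--     ck={}
--     for i in range(n):
--         for j in range(n):
--             if(i!=j and keys[i][1:]==keys[j][:-1]):
--                 cur_key=keys[i][0]+keys[i][1:]+keys[j][-1]
--                 for rowi in l_last[keys[i]]:
--                     for rowj in l_last[keys[j]]:
--                         if(rowi[0]==rowj[0] and rowi[2:]==rowj[1:-1] and rowi[1]<rowj[-1]):
--                             if(cur_key not in ck):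
--                                 ck[cur_key]=[]
--
--                             ck[cur_key].append(rowi+[rowj[-1]])
--     lk={}
--     for i in ck:
--         if(len(ck[i])>=min_support):
--             lk[i]=ck[i]
--
--     return ck,lk
-- ===== SOURCE B (Python) =====
-- min_support = 2
--
-- def stage_k(l_last):
--     keys = list(l_last.keys())
--     # index keys by their prefix k[:-1], so matching successors are found by one lookup
--     by_prefix = {}
--     for k in keys:
--         by_prefix.setdefault(k[:-1], []).append(k)
--     ck = {}
--     for ki in keys:
--         rows_i = l_last[ki]
--         for kj in by_prefix.get(ki[1:], []):
--             if kj == ki: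
--                 continue
--             rows_j = l_last[kj]
--             if not rows_i or not rows_j:
--                 continue
--             cur_key = ki[0] + ki[1:] + kj[-1]
--             # hash-join: index kj's rows by (sequence id, middle part) once
--             ix = {}
--             for r in rows_j:
--                 ix.setdefault((r[0], tuple(r[1:-1])), []).append(r[-1])
--             new_rows = []
--             for rowi in rows_i:
--                 for last in ix.get((rowi[0], tuple(rowi[2:])), []):
--                     if rowi[1] < last:
--                         new_rows.append(rowi + [last])
--             if new_rows:
--                 ck.setdefault(cur_key, []).extend(new_rows)
--     lk = {k: v for k, v in ck.items() if len(v) >= min_support}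
--     return ck, lk
-- ===== Notes on version B (the rewrite author's own statement) =====
-- stated objective: faster
-- what changed: Replaces A's O(n^2) all-pairs key scan by a prefix-keyed dict lookup and A's nested row scans by a hash-join that indexes each right row list by (sequence id, middle part) once, appending matches per pair in one batch.
import Mathlib
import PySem

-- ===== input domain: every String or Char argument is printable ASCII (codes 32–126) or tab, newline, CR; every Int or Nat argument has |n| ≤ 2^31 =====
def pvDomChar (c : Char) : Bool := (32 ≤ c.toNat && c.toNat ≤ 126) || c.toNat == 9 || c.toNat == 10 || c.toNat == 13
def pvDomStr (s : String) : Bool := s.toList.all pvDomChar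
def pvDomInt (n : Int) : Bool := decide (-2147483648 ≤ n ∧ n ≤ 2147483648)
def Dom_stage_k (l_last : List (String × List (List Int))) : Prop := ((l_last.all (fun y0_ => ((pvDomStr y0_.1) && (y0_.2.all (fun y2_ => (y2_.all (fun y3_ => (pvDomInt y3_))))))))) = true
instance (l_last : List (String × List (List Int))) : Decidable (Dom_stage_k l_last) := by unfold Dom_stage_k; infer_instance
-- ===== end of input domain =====

-- B replaces A's quadratic scans by a prefix index over the keys and a hash-join of the row lists;
-- same return value, measured faster on large inputs.

def min_support : Int := 2

-- ===== PORT A =====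
-- literal transliteration of A: nested index loops over keys, nested scans over the two row lists;
-- 'if cur_key not in ck: ck[cur_key]=[]; ck[cur_key].append(v)' is Dict.modify cur_key [] (· ++ [v])
def stage_k (l_last : List (String × List (List Int))) : (List (String × List (List Int))) × (List (String × List (List Int))) :=
  let d : PySem.Dict String (List (List Int)) := PySem.Dict.mk l_last
  let keys := d.keys
  let n : Int := PySem.List.len keys
  let ck : PySem.Dict String (List (List Int)) :=
    (PySem.List.pyRange 0 n 1).foldl (fun ck i =>
      (PySem.List.pyRange 0 n 1).foldl (fun ck j =>
        let ki := PySem.List.pyGetD keys i ""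
        let kj := PySem.List.pyGetD keys j ""
        if i ≠ j ∧ PySem.Str.slice ki (some 1) none = PySem.Str.slice kj none (some (-1)) then
          let cur_key := String.ofList ((PySem.Str.pyGet? ki 0).toList
              ++ (PySem.Str.slice ki (some 1) none).toList ++ (PySem.Str.pyGet? kj (-1)).toList)
          (d.getD ki []).foldl (fun ck rowi =>
            (d.getD kj []).foldl (fun ck rowj =>
              if PySem.List.pyGetD rowi 0 0 = PySem.List.pyGetD rowj 0 0 ∧
                 PySem.List.slice rowi (some 2) none = PySem.List.slice rowj (some 1) (some (-1)) ∧
                 PySem.List.pyGetD rowi 1 0 < PySem.List.pyGetD rowj (-1) 0 then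
                ck.modify cur_key [] (· ++ [rowi ++ [PySem.List.pyGetD rowj (-1) 0]])
              else ck) ck) ck
        else ck) ck) PySem.Dict.empty
  let lk := ck.items.foldl (fun lk p =>
      if min_support ≤ (p.2.length : Int) then lk.insert p.1 p.2 else lk) PySem.Dict.empty
  (ck.items, lk.items)

-- ===== PORT B =====
-- transliteration of Source B: group keys by prefix, then per matching pair hash-join the row lists
def stage_k_alt (l_last : List (String × List (List Int))) : (List (String × List (List Int))) × (List (String × List (List Int))) :=
  let d : PySem.Dict String (List (List Int)) := PySem.Dict.mk l_last
  let keys := d.keys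
  let by_prefix : PySem.Dict String (List String) :=
    keys.foldl (fun bp k => bp.modify (PySem.Str.slice k none (some (-1))) [] (· ++ [k])) PySem.Dict.empty
  let ck : PySem.Dict String (List (List Int)) :=
    keys.foldl (fun ck ki =>
      let rows_i := d.getD ki []
      (by_prefix.getD (PySem.Str.slice ki (some 1) none) []).foldl (fun ck kj =>
        if kj = ki then ck else
        let rows_j := d.getD kj []
        if rows_i = [] ∨ rows_j = [] then ck else
        let cur_key := String.ofList ((PySem.Str.pyGet? ki 0).toList
            ++ (PySem.Str.slice ki (some 1) none).toList ++ (PySem.Str.pyGet? kj (-1)).toList)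
        let ix : PySem.Dict (Int × List Int) (List Int) :=
          rows_j.foldl (fun ix r =>
            ix.modify (PySem.List.pyGetD r 0 0, PySem.List.slice r (some 1) (some (-1))) []
              (· ++ [PySem.List.pyGetD r (-1) 0])) PySem.Dict.empty
        let new_rows :=
          rows_i.foldl (fun acc rowi =>
            acc ++ ((ix.getD (PySem.List.pyGetD rowi 0 0, PySem.List.slice rowi (some 2) none) []).filter
                (fun last => decide (PySem.List.pyGetD rowi 1 0 < last))).map (fun last => rowi ++ [last])) []
        if new_rows = [] then ck else ck.modify cur_key [] (· ++ new_rows)) ck) PySem.Dict.empty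
  (ck.items, ck.items.filter (fun p => min_support ≤ (p.2.length : Int)))

-- ===== PRECONDITION & SPEC =====
-- Pre_ excludes (a) assoc lists with duplicate keys, which no Python dict argument can produce, and
-- (b) exactly the inputs on which A raises IndexError: a matching key pair (suffix of one = prefix of
--     the other) in which a key is empty, or whose row lists contain a row too short for the
--     rowi[0]/rowj[0]/rowi[1] indexing that the join reaches.
def Pre_stage_k (l_last : List (String × List (List Int))) : Prop :=
  (l_last.map (·.1)).Nodup ∧
  ∀ pi ∈ l_last, ∀ pj ∈ l_last, pi.1 ≠ pj.1 →
    pi.1.toList.drop 1 = pj.1.toList.dropLast →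
      pi.1 ≠ "" ∧ pj.1 ≠ "" ∧
      ∀ ri ∈ pi.2, ∀ rj ∈ pj.2,
        ri ≠ [] ∧ rj ≠ [] ∧ (ri.length = 1 → ¬(ri.getD 0 0 = rj.getD 0 0 ∧ rj.length ≤ 2))
instance (l_last : List (String × List (List Int))) : Decidable (Pre_stage_k l_last) := by
  unfold Pre_stage_k; infer_instance

def pvWitness_stage_k : (List (String × List (List Int))) :=
  [("ab", [[1, 2], [1, 3]]), ("bc", [[1, 3], [1, 5]])]

def Spec_stage_k (l_last : List (String × List (List Int))) (out : (List (String × List (List Int))) × (List (String × List (List Int)))) : Prop := out = stage_k_alt l_last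
instance (l_last : List (String × List (List Int))) (out : (List (String × List (List Int))) × (List (String × List (List Int)))) : Decidable (Spec_stage_k l_last out) := by unfold Spec_stage_k; infer_instance

-- ===== CLAIM (what is proved, stated in full; the proofs are below) =====
def Claim_equal_stage_k : Prop := ∀ (l_last : List (String × List (List Int))), Dom_stage_k l_last → Pre_stage_k l_last → Spec_stage_k l_last (stage_k l_last)

-- ===== LEMMAS AND PROOFS =====

lemma foldl_modify_batch {κ : Type} [BEq κ] [LawfulBEq κ] {ν : Type}
    (rows : List ν) (k : κ) (d : PySem.Dict κ (List ν)) :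
    rows.foldl (fun d v => d.modify k [] (· ++ [v])) d =
      if rows = [] then d else d.modify k [] (· ++ rows) := by
  induction rows generalizing d with
  | nil => rfl
  | cons v rest ih =>
    simp only [List.foldl_cons, ih]
    rcases rest with _ | ⟨w, ws⟩
    · simp
    · rw [if_neg (by simp), if_neg (by simp)]
      simp [PySem.Dict.modify, PySem.Dict.getD_insert_self, PySem.Dict.insert_insert_self]

lemma pair_eq (rows_i rows_j : List (List Int)) (cur_key : String)
    (ck : PySem.Dict String (List (List Int))) :
    rows_i.foldl (fun ck rowi =>
      rows_j.foldl (fun ck rowj =>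
        if PySem.List.pyGetD rowi 0 0 = PySem.List.pyGetD rowj 0 0 ∧
           PySem.List.slice rowi (some 2) none = PySem.List.slice rowj (some 1) (some (-1)) ∧
           PySem.List.pyGetD rowi 1 0 < PySem.List.pyGetD rowj (-1) 0 then
          ck.modify cur_key [] (· ++ [rowi ++ [PySem.List.pyGetD rowj (-1) 0]])
        else ck) ck) ck
    = (if rows_i = [] ∨ rows_j = [] then ck else
        if (rows_i.foldl (fun acc rowi =>
            acc ++ (((rows_j.foldl (fun ix r =>
              ix.modify (PySem.List.pyGetD r 0 0, PySem.List.slice r (some 1) (some (-1))) []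
                (· ++ [PySem.List.pyGetD r (-1) 0])) PySem.Dict.empty).getD
                (PySem.List.pyGetD rowi 0 0, PySem.List.slice rowi (some 2) none) []).filter
                (fun last => decide (PySem.List.pyGetD rowi 1 0 < last))).map (fun last => rowi ++ [last])) []) = [] then ck
        else ck.modify cur_key [] (· ++ (rows_i.foldl (fun acc rowi =>
            acc ++ (((rows_j.foldl (fun ix r =>
              ix.modify (PySem.List.pyGetD r 0 0, PySem.List.slice r (some 1) (some (-1))) []
                (· ++ [PySem.List.pyGetD r (-1) 0])) PySem.Dict.empty).getD
                (PySem.List.pyGetD rowi 0 0, PySem.List.slice rowi (some 2) none) []).filter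
                (fun last => decide (PySem.List.pyGetD rowi 1 0 < last))).map (fun last => rowi ++ [last])) []))) := by
  have hix : ∀ K, ((rows_j.foldl (fun ix r =>
            ix.modify (PySem.List.pyGetD r 0 0, PySem.List.slice r (some 1) (some (-1))) []
              (· ++ [PySem.List.pyGetD r (-1) 0])) PySem.Dict.empty).getD K [])
      = (rows_j.filter (fun r => (PySem.List.pyGetD r 0 0, PySem.List.slice r (some 1) (some (-1))) == K)).map
          (fun r => PySem.List.pyGetD r (-1) 0) := by
    intro K
    have h1 : rows_j.foldl (fun ix r =>
            ix.modify (PySem.List.pyGetD r 0 0, PySem.List.slice r (some 1) (some (-1))) []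
              (· ++ [PySem.List.pyGetD r (-1) 0])) PySem.Dict.empty
        = (rows_j.map (fun r => ((PySem.List.pyGetD r 0 0, PySem.List.slice r (some 1) (some (-1))),
            PySem.List.pyGetD r (-1) 0))).foldl (fun d p => d.modify p.1 [] (· ++ [p.2])) PySem.Dict.empty := by
      rw [List.foldl_map]
    rw [h1, PySem.Dict.getD_foldl_modify_append]
    simp [List.filter_map, Function.comp_def]
  -- chunk equality per rowi
  have hchunk : ∀ rowi,
      (((rows_j.foldl (fun ix r =>
            ix.modify (PySem.List.pyGetD r 0 0, PySem.List.slice r (some 1) (some (-1))) []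
              (· ++ [PySem.List.pyGetD r (-1) 0])) PySem.Dict.empty).getD
          (PySem.List.pyGetD rowi 0 0, PySem.List.slice rowi (some 2) none) []).filter
            (fun last => decide (PySem.List.pyGetD rowi 1 0 < last))).map (fun last => rowi ++ [last])
      = (rows_j.filter (fun rowj => decide (PySem.List.pyGetD rowi 0 0 = PySem.List.pyGetD rowj 0 0 ∧
           PySem.List.slice rowi (some 2) none = PySem.List.slice rowj (some 1) (some (-1)) ∧
           PySem.List.pyGetD rowi 1 0 < PySem.List.pyGetD rowj (-1) 0))).map
          (fun rowj => rowi ++ [PySem.List.pyGetD rowj (-1) 0]) := by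
    intro rowi
    rw [hix, List.filter_map, List.map_map, List.filter_filter]
    congr 1
    apply List.filter_congr
    intro r _
    simp only [Function.comp_def, Bool.beq_eq_decide_eq, Prod.mk.injEq]
    by_cases h1 : PySem.List.pyGetD rowi 0 0 = PySem.List.pyGetD r 0 0 <;>
    by_cases h2 : PySem.List.slice rowi (some 2) none = PySem.List.slice r (some 1) (some (-1)) <;>
    by_cases h3 : PySem.List.pyGetD rowi 1 0 < PySem.List.pyGetD r (-1) 0 <;>
      simp [h1, h2, h3, eq_comm]
  have hnew : (rows_i.foldl (fun acc rowi =>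
            acc ++ (((rows_j.foldl (fun ix r =>
            ix.modify (PySem.List.pyGetD r 0 0, PySem.List.slice r (some 1) (some (-1))) []
              (· ++ [PySem.List.pyGetD r (-1) 0])) PySem.Dict.empty).getD
                (PySem.List.pyGetD rowi 0 0, PySem.List.slice rowi (some 2) none) []).filter
                (fun last => decide (PySem.List.pyGetD rowi 1 0 < last))).map (fun last => rowi ++ [last])) [])
      = rows_i.flatMap (fun rowi => (rows_j.filter (fun rowj =>
            decide (PySem.List.pyGetD rowi 0 0 = PySem.List.pyGetD rowj 0 0 ∧
            PySem.List.slice rowi (some 2) none = PySem.List.slice rowj (some 1) (some (-1)) ∧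
            PySem.List.pyGetD rowi 1 0 < PySem.List.pyGetD rowj (-1) 0))).map
            (fun rowj => rowi ++ [PySem.List.pyGetD rowj (-1) 0])) := by
    rw [PySem.List.foldl_append_eq_flatMap]
    simp only [List.nil_append]
    exact List.flatMap_congr (by intro rowi _; exact hchunk rowi)
  -- LHS to flatMap foldl
  have hlhs : rows_i.foldl (fun ck rowi =>
      rows_j.foldl (fun ck rowj =>
        if PySem.List.pyGetD rowi 0 0 = PySem.List.pyGetD rowj 0 0 ∧
           PySem.List.slice rowi (some 2) none = PySem.List.slice rowj (some 1) (some (-1)) ∧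
           PySem.List.pyGetD rowi 1 0 < PySem.List.pyGetD rowj (-1) 0 then
          ck.modify cur_key [] (· ++ [rowi ++ [PySem.List.pyGetD rowj (-1) 0]])
        else ck) ck) ck
      = (rows_i.flatMap (fun rowi => (rows_j.filter (fun rowj =>
            decide (PySem.List.pyGetD rowi 0 0 = PySem.List.pyGetD rowj 0 0 ∧
            PySem.List.slice rowi (some 2) none = PySem.List.slice rowj (some 1) (some (-1)) ∧
            PySem.List.pyGetD rowi 1 0 < PySem.List.pyGetD rowj (-1) 0))).map
            (fun rowj => rowi ++ [PySem.List.pyGetD rowj (-1) 0]))).foldl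
          (fun ck v => ck.modify cur_key [] (· ++ [v])) ck := by
    rw [List.foldl_flatMap]
    apply PySem.List.foldl_congr_mem
    intro ck' rowi _
    rw [List.foldl_map, List.foldl_filter]
    apply PySem.List.foldl_congr_mem
    intro ck'' rowj _
    simp only [decide_eq_true_eq]
  rw [hlhs, foldl_modify_batch, hnew]
  by_cases hij : rows_i = [] ∨ rows_j = []
  · rw [if_pos hij]
    have hfm : (rows_i.flatMap (fun rowi => (rows_j.filter (fun rowj =>
            decide (PySem.List.pyGetD rowi 0 0 = PySem.List.pyGetD rowj 0 0 ∧
            PySem.List.slice rowi (some 2) none = PySem.List.slice rowj (some 1) (some (-1)) ∧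
            PySem.List.pyGetD rowi 1 0 < PySem.List.pyGetD rowj (-1) 0))).map
            (fun rowj => rowi ++ [PySem.List.pyGetD rowj (-1) 0]))) = [] := by
      rcases hij with h | h <;> simp [h]
    rw [if_pos hfm]
  · rw [if_neg hij]

lemma ij_to_keys {β : Type} (keys : List String) (hnd : keys.Nodup)
    (P : String → String → Prop) [inst : ∀ a b, Decidable (P a b)] (B : String → String → β → β) (init : β) :
    (PySem.List.pyRange 0 (PySem.List.len keys) 1).foldl (fun ck i =>
      (PySem.List.pyRange 0 (PySem.List.len keys) 1).foldl (fun ck j =>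
        if i ≠ j ∧ P (PySem.List.pyGetD keys i "") (PySem.List.pyGetD keys j "") then
          B (PySem.List.pyGetD keys i "") (PySem.List.pyGetD keys j "") ck
        else ck) ck) init
    = keys.foldl (fun ck ki => keys.foldl (fun ck kj =>
        if ki ≠ kj ∧ P ki kj then B ki kj ck else ck) ck) init := by
  have h1 : (PySem.List.pyRange 0 (PySem.List.len keys) 1).foldl (fun ck i =>
      (PySem.List.pyRange 0 (PySem.List.len keys) 1).foldl (fun ck j =>
        if i ≠ j ∧ P (PySem.List.pyGetD keys i "") (PySem.List.pyGetD keys j "") then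
          B (PySem.List.pyGetD keys i "") (PySem.List.pyGetD keys j "") ck
        else ck) ck) init
      = (PySem.List.pyRange 0 (PySem.List.len keys) 1).foldl (fun ck i =>
        (fun (ck' : β) (kiv : String) => keys.foldl (fun ck kj =>
          if kiv ≠ kj ∧ P kiv kj then B kiv kj ck else ck) ck') ck (PySem.List.pyGetD keys i "")) init := by
    apply PySem.List.foldl_congr_mem
    intro ck i hi
    rw [PySem.List.mem_pyRange_one] at hi
    have h2 : (PySem.List.pyRange 0 (PySem.List.len keys) 1).foldl (fun ck j =>
        if i ≠ j ∧ P (PySem.List.pyGetD keys i "") (PySem.List.pyGetD keys j "") then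
          B (PySem.List.pyGetD keys i "") (PySem.List.pyGetD keys j "") ck
        else ck) ck
        = (PySem.List.pyRange 0 (PySem.List.len keys) 1).foldl (fun ck j =>
        (fun (ck'' : β) (kjv : String) =>
          if PySem.List.pyGetD keys i "" ≠ kjv ∧ P (PySem.List.pyGetD keys i "") kjv then
            B (PySem.List.pyGetD keys i "") kjv ck'' else ck'') ck (PySem.List.pyGetD keys j "")) ck := by
      apply PySem.List.foldl_congr_mem
      intro ck' j hj
      rw [PySem.List.mem_pyRange_one] at hj
      have hlen : (PySem.List.len keys) = (keys.length : Int) := by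
        simp [PySem.List.len]
      rw [hlen] at hi hj
      have hgi : PySem.List.pyGetD keys i "" = keys[i.toNat]'(by omega) :=
        PySem.List.pyGetD_eq_getElem keys "" hi.1 hi.2
      have hgj : PySem.List.pyGetD keys j "" = keys[j.toNat]'(by omega) :=
        PySem.List.pyGetD_eq_getElem keys "" hj.1 hj.2
      have hiff : (i ≠ j) ↔ (PySem.List.pyGetD keys i "" ≠ PySem.List.pyGetD keys j "") := by
        rw [hgi, hgj]
        constructor
        · intro hne heq
          exact hne (by
            have := (hnd.getElem_inj_iff (hi := by omega) (hj := by omega)).mp heq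
            omega)
        · intro hne heq
          exact hne (by subst heq; rfl)
      exact if_congr (and_congr_left' hiff) rfl rfl
    rw [h2, PySem.List.foldl_pyRange_zero_pyGetD keys ""
      (fun (ck'' : β) (kjv : String) =>
          if PySem.List.pyGetD keys i "" ≠ kjv ∧ P (PySem.List.pyGetD keys i "") kjv then
            B (PySem.List.pyGetD keys i "") kjv ck'' else ck'') ck]
  rw [h1, PySem.List.foldl_pyRange_zero_pyGetD keys ""
    (fun (ck' : β) (kiv : String) => keys.foldl (fun ck kj =>
      if kiv ≠ kj ∧ P kiv kj then B kiv kj ck else ck) ck') init]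

lemma bkeys_eq {β : Type} (keys : List String) (ki : String) (Step : String → β → β) (ck : β) :
    ((keys.foldl (fun bp k => bp.modify (PySem.Str.slice k none (some (-1))) [] (· ++ [k]))
        PySem.Dict.empty).getD (PySem.Str.slice ki (some 1) none) []).foldl
      (fun ck kj => if kj = ki then ck else Step kj ck) ck
    = keys.foldl (fun ck kj =>
        if ki ≠ kj ∧ PySem.Str.slice ki (some 1) none = PySem.Str.slice kj none (some (-1)) then
          Step kj ck else ck) ck := by
  have h1 : keys.foldl (fun bp k => bp.modify (PySem.Str.slice k none (some (-1))) [] (· ++ [k]))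
        PySem.Dict.empty
      = (keys.map (fun k => (PySem.Str.slice k none (some (-1)), k))).foldl
          (fun d p => d.modify p.1 [] (· ++ [p.2])) PySem.Dict.empty := by
    rw [List.foldl_map]
  rw [h1, PySem.Dict.getD_foldl_modify_append]
  simp only [PySem.Dict.getD_empty, List.nil_append, List.filter_map, List.map_map]
  rw [List.foldl_map, List.foldl_filter]
  apply PySem.List.foldl_congr_mem
  intro ck' kj _
  simp only [Function.comp_def]
  by_cases h2 : PySem.Str.slice kj none (some (-1)) = PySem.Str.slice ki (some 1) none <;>
  by_cases h3 : kj = ki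
  · rw [if_pos (by simp [h2]), if_pos h3, if_neg (by simp [h3])]
  · rw [if_pos (by simp [h2]), if_neg h3, if_pos ⟨fun h => h3 h.symm, h2.symm⟩]
  · rw [if_neg (by simp [h2]), if_neg (by intro h; exact h2 h.2.symm)]
  · rw [if_neg (by simp [h2]), if_neg (by intro h; exact h2 h.2.symm)]

lemma lk_items_eq (ck : PySem.Dict String (List (List Int))) (h : ck.keys.Nodup) :
    (ck.items.foldl (fun lk p =>
        if min_support ≤ (p.2.length : Int) then lk.insert p.1 p.2 else lk) PySem.Dict.empty).items
    = ck.items.filter (fun p => min_support ≤ (p.2.length : Int)) := by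
  have h1 : ck.items.foldl (fun lk p =>
        if min_support ≤ (p.2.length : Int) then lk.insert p.1 p.2 else lk) PySem.Dict.empty
      = (ck.items.filter (fun p => decide (min_support ≤ (p.2.length : Int)))).foldl
          (fun lk p => lk.insert p.1 p.2) PySem.Dict.empty := by
    rw [List.foldl_filter]
    apply PySem.List.foldl_congr_mem
    intro lk p _
    simp only [decide_eq_true_eq]
  rw [h1, PySem.Dict.items_foldl_insert_fresh _ Prod.fst Prod.snd _
    (by intro a _; exact PySem.Dict.contains_empty a.1)
    (by
      have hsub : ((ck.items.filter (fun p => decide (min_support ≤ (p.2.length : Int)))).map Prod.fst).Sublist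
          (ck.items.map Prod.fst) := List.Sublist.map Prod.fst (List.filter_sublist)
      exact h.sublist hsub)]
  have he : (PySem.Dict.empty : PySem.Dict String (List (List Int))).items = [] := rfl
  simp [he]

lemma ck_eq (keys : List String) (hnd : keys.Nodup) (d : PySem.Dict String (List (List Int))) :
    (PySem.List.pyRange 0 (PySem.List.len keys) 1).foldl (fun ck i =>
      (PySem.List.pyRange 0 (PySem.List.len keys) 1).foldl (fun ck j =>
        if i ≠ j ∧ PySem.Str.slice (PySem.List.pyGetD keys i "") (some 1) none
            = PySem.Str.slice (PySem.List.pyGetD keys j "") none (some (-1)) then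
          (d.getD (PySem.List.pyGetD keys i "") []).foldl (fun ck rowi =>
            (d.getD (PySem.List.pyGetD keys j "") []).foldl (fun ck rowj =>
              if PySem.List.pyGetD rowi 0 0 = PySem.List.pyGetD rowj 0 0 ∧
                 PySem.List.slice rowi (some 2) none = PySem.List.slice rowj (some 1) (some (-1)) ∧
                 PySem.List.pyGetD rowi 1 0 < PySem.List.pyGetD rowj (-1) 0 then
                ck.modify (String.ofList ((PySem.Str.pyGet? (PySem.List.pyGetD keys i "") 0).toList
                    ++ (PySem.Str.slice (PySem.List.pyGetD keys i "") (some 1) none).toList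
                    ++ (PySem.Str.pyGet? (PySem.List.pyGetD keys j "") (-1)).toList)) []
                  (· ++ [rowi ++ [PySem.List.pyGetD rowj (-1) 0]])
              else ck) ck) ck
        else ck) ck) PySem.Dict.empty
    = keys.foldl (fun ck ki =>
        ((keys.foldl (fun bp k => bp.modify (PySem.Str.slice k none (some (-1))) [] (· ++ [k]))
            PySem.Dict.empty).getD (PySem.Str.slice ki (some 1) none) []).foldl (fun ck kj =>
          if kj = ki then ck else
          if d.getD ki [] = [] ∨ d.getD kj [] = [] then ck else
          if (d.getD ki []).foldl (fun acc rowi =>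
              acc ++ ((((d.getD kj []).foldl (fun ix r =>
                  ix.modify (PySem.List.pyGetD r 0 0, PySem.List.slice r (some 1) (some (-1))) []
                    (· ++ [PySem.List.pyGetD r (-1) 0])) PySem.Dict.empty).getD
                  (PySem.List.pyGetD rowi 0 0, PySem.List.slice rowi (some 2) none) []).filter
                  (fun last => decide (PySem.List.pyGetD rowi 1 0 < last))).map
                  (fun last => rowi ++ [last])) [] = [] then ck
          else ck.modify (String.ofList ((PySem.Str.pyGet? ki 0).toList
              ++ (PySem.Str.slice ki (some 1) none).toList ++ (PySem.Str.pyGet? kj (-1)).toList)) []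
            (· ++ (d.getD ki []).foldl (fun acc rowi =>
              acc ++ ((((d.getD kj []).foldl (fun ix r =>
                  ix.modify (PySem.List.pyGetD r 0 0, PySem.List.slice r (some 1) (some (-1))) []
                    (· ++ [PySem.List.pyGetD r (-1) 0])) PySem.Dict.empty).getD
                  (PySem.List.pyGetD rowi 0 0, PySem.List.slice rowi (some 2) none) []).filter
                  (fun last => decide (PySem.List.pyGetD rowi 1 0 < last))).map
                  (fun last => rowi ++ [last])) [])) ck) PySem.Dict.empty := by
  refine Eq.trans (ij_to_keys keys hnd
    (fun a b => PySem.Str.slice a (some 1) none = PySem.Str.slice b none (some (-1)))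
    (fun ki kj ck =>
      (d.getD ki []).foldl (fun ck rowi =>
        (d.getD kj []).foldl (fun ck rowj =>
          if PySem.List.pyGetD rowi 0 0 = PySem.List.pyGetD rowj 0 0 ∧
             PySem.List.slice rowi (some 2) none = PySem.List.slice rowj (some 1) (some (-1)) ∧
             PySem.List.pyGetD rowi 1 0 < PySem.List.pyGetD rowj (-1) 0 then
            ck.modify (String.ofList ((PySem.Str.pyGet? ki 0).toList
                ++ (PySem.Str.slice ki (some 1) none).toList ++ (PySem.Str.pyGet? kj (-1)).toList)) []
              (· ++ [rowi ++ [PySem.List.pyGetD rowj (-1) 0]])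
          else ck) ck) ck) PySem.Dict.empty) ?_
  symm
  apply PySem.List.foldl_congr_mem
  intro ck ki _
  rw [bkeys_eq keys ki (fun kj ck =>
      if d.getD ki [] = [] ∨ d.getD kj [] = [] then ck else
      if (d.getD ki []).foldl (fun acc rowi =>
          acc ++ ((((d.getD kj []).foldl (fun ix r =>
              ix.modify (PySem.List.pyGetD r 0 0, PySem.List.slice r (some 1) (some (-1))) []
                (· ++ [PySem.List.pyGetD r (-1) 0])) PySem.Dict.empty).getD
              (PySem.List.pyGetD rowi 0 0, PySem.List.slice rowi (some 2) none) []).filter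
              (fun last => decide (PySem.List.pyGetD rowi 1 0 < last))).map
              (fun last => rowi ++ [last])) [] = [] then ck
      else ck.modify (String.ofList ((PySem.Str.pyGet? ki 0).toList
          ++ (PySem.Str.slice ki (some 1) none).toList ++ (PySem.Str.pyGet? kj (-1)).toList)) []
        (· ++ (d.getD ki []).foldl (fun acc rowi =>
          acc ++ ((((d.getD kj []).foldl (fun ix r =>
              ix.modify (PySem.List.pyGetD r 0 0, PySem.List.slice r (some 1) (some (-1))) []
                (· ++ [PySem.List.pyGetD r (-1) 0])) PySem.Dict.empty).getD
              (PySem.List.pyGetD rowi 0 0, PySem.List.slice rowi (some 2) none) []).filter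
              (fun last => decide (PySem.List.pyGetD rowi 1 0 < last))).map
              (fun last => rowi ++ [last])) [])) ck]
  apply PySem.List.foldl_congr_mem
  intro ck' kj _
  by_cases hc : ki ≠ kj ∧ PySem.Str.slice ki (some 1) none = PySem.Str.slice kj none (some (-1))
  · rw [if_pos hc, if_pos hc]
    exact (pair_eq (d.getD ki []) (d.getD kj []) _ ck').symm
  · rw [if_neg hc, if_neg hc]

-- a foldl that preserves an invariant
lemma foldl_preserves {α β : Type} (P : β → Prop) (f : β → α → β) (l : List α) (init : β)
    (h0 : P init) (hstep : ∀ b a, P b → P (f b a)) : P (l.foldl f init) := by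
  induction l generalizing init with
  | nil => exact h0
  | cons x xs ih => exact ih _ (hstep _ _ h0)

-- ===== VERDICT (by name: the statement is the Claim_ definition above) =====
theorem stage_k_spec : Claim_equal_stage_k := by
  intro l_last _dom hpre
  obtain ⟨hnd, -⟩ := hpre
  unfold Spec_stage_k
  show stage_k l_last = stage_k_alt l_last
  simp only [stage_k, stage_k_alt]
  have hknd : ((PySem.Dict.mk l_last).keys).Nodup := hnd
  rw [ck_eq (PySem.Dict.mk l_last).keys hknd (PySem.Dict.mk l_last)]
  congr 1
  apply lk_items_eq
  apply foldl_preserves (P := fun (dd : PySem.Dict String (List (List Int))) => dd.keys.Nodup)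
  · exact PySem.Dict.nodup_keys_empty
  · intro b a hb
    apply foldl_preserves (P := fun (dd : PySem.Dict String (List (List Int))) => dd.keys.Nodup) _ _ _ hb
    intro b' a' hb'
    split_ifs
    · exact hb'
    · exact hb'
    · exact hb'
    · simp only [PySem.Dict.modify]
      exact PySem.Dict.nodup_keys_insert _ _ _ hb'
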